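-- pv_equiv track=rewrite | github.com/anmacolo/RSA-Program | RSA.py | Find_Bezout_1
-- ===== SOURCE A (Python) =====
-- def Find_Bezout_1(a,b):
--     s1, t1 = 1, 0 #initial coefficients for a: a = a*1 + b*0
--     s2, t2 = 0, 1
--
--     while (b>0): #loop ends when b reaches 0
--         k = a % b
--         quotient = a // b
--
--         a = b
--         b = k
--
--         new_s1, new_t1 = s2, t2 #used to update s1, t1 later
--         new_s2, new_t2 = s1 - quotient * s2, t1 - quotient * t2 #used to update s2, t2 later
--
--         s1, t1 = new_s1, new_t1
--         s2, t2 = new_s2, new_t2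
--
--     return s1 #returns first Bezout coefficient
-- ===== SOURCE B (Python) =====
-- def _ext(a, b):
--     # returns Bezout pair (x, y) with x*a + y*b == gcd(a, b) for b > 0; (1, 0) once b <= 0
--     if b <= 0:
--         return (1, 0)
--     x, y = _ext(b, a % b)
--     return (y, x - (a // b) * y)
--
-- def Find_Bezout_1(a, b):
--     return _ext(a, b)[0]
-- ===== Notes on version B (the rewrite author's own statement) =====
-- stated objective: alternative
-- what changed: Replaced the iterative loop carrying four explicit coefficient accumulators (s1,t1,s2,t2) by a recursive extended-Euclid helper that returns a Bezout pair and back-substitutes on the way out of the recursion.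
import Mathlib
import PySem

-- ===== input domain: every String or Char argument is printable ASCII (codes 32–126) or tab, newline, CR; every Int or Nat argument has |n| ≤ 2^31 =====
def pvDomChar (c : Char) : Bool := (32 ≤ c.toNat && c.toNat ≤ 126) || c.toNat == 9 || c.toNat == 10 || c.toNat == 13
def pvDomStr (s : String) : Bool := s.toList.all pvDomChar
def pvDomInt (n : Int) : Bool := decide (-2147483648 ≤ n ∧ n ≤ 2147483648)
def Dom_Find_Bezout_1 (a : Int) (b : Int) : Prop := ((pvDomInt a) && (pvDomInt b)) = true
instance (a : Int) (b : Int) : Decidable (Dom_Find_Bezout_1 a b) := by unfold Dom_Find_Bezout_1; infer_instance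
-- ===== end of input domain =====

-- B recomputes A's result by a recursive extended-Euclid helper instead of A's iterative four-accumulator loop; same cost (alternative decomposition).

-- ===== PORT A =====
-- the while loop of A, state (a, b, s1, t1, s2, t2)
def pvALoop (a b s1 t1 s2 t2 : Int) : Int :=
  if h : b > 0 then
    pvALoop b (PySem.Int.mod a b) s2 t2 (s1 - PySem.Int.floordiv a b * s2) (t1 - PySem.Int.floordiv a b * t2)
  else s1
termination_by b.toNat
decreasing_by
  have h1 := PySem.Int.mod_nonneg a h
  have h2 := PySem.Int.mod_lt a h
  omega

def Find_Bezout_1 (a : Int) (b : Int) : Int := pvALoop a b 1 0 0 1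

-- ===== PORT B =====
-- recursive helper _ext: Bezout pair via back-substitution
def pvExt (a b : Int) : Int × Int :=
  if h : b ≤ 0 then (1, 0)
  else
    let p := pvExt b (PySem.Int.mod a b)
    (p.2, p.1 - PySem.Int.floordiv a b * p.2)
termination_by b.toNat
decreasing_by
  have hb : (0:Int) < b := by omega
  have h1 := PySem.Int.mod_nonneg a hb
  have h2 := PySem.Int.mod_lt a hb
  omega

def Find_Bezout_1_alt (a : Int) (b : Int) : Int := (pvExt a b).1

-- ===== PRECONDITION & SPEC =====
def Spec_Find_Bezout_1 (a : Int) (b : Int) (out : Int) : Prop := out = Find_Bezout_1_alt a b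
instance (a : Int) (b : Int) (out : Int) : Decidable (Spec_Find_Bezout_1 a b out) := by unfold Spec_Find_Bezout_1; infer_instance

-- ===== CLAIM (what is proved, stated in full; the proofs are below) =====
def Claim_equal_Find_Bezout_1 : Prop := ∀ (a : Int) (b : Int), Dom_Find_Bezout_1 a b → Spec_Find_Bezout_1 a b (Find_Bezout_1 a b)

-- ===== LEMMAS AND PROOFS =====

-- the loop result is the linear combination of the Bezout pair with the s-accumulators
theorem pvALoop_eq_ext (n : Nat) : ∀ (a b s1 t1 s2 t2 : Int), b.toNat ≤ n →
    pvALoop a b s1 t1 s2 t2 = s1 * (pvExt a b).1 + s2 * (pvExt a b).2 := by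
  induction n with
  | zero =>
    intro a b s1 t1 s2 t2 hb
    have hb' : ¬ b > 0 := by omega
    have hb2 : b ≤ 0 := by omega
    rw [pvALoop, pvExt]
    simp [hb', hb2]
  | succ n ih =>
    intro a b s1 t1 s2 t2 hb
    by_cases h : b > 0
    · have h1 := PySem.Int.mod_nonneg a h
      have h2 := PySem.Int.mod_lt a h
      have h' : ¬ b ≤ 0 := by omega
      rw [pvALoop, pvExt]
      simp only [dif_pos h, dif_neg h']
      rw [ih _ _ _ _ _ _ (by omega)]
      ring
    · have hb2 : b ≤ 0 := by omega
      rw [pvALoop, pvExt]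
      simp [h, hb2]

-- ===== VERDICT (by name: the statement is the Claim_ definition above) =====
theorem Find_Bezout_1_spec : Claim_equal_Find_Bezout_1 := by
  intro a b _
  show Find_Bezout_1 a b = Find_Bezout_1_alt a b
  unfold Find_Bezout_1 Find_Bezout_1_alt
  rw [pvALoop_eq_ext b.toNat a b 1 0 0 1 le_rfl]
  ring
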